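-- pv_equiv track=rewrite | github.com/EugenefedorovPro/avantgarde | backend/avantgarde/utils/rand_verse.py | _format_words_md
-- ===== SOURCE A (Python) =====
-- WORDS_PER_LINE = 4  # how many words in each rendered line
--
-- def _format_words_md(words: list[str], words_per_line: int = WORDS_PER_LINE) -> str:
--     if words_per_line <= 0:
--         raise ValueError("words_per_line must be > 0")
--
--     lines: list[str] = []
--     for i in range(0, len(words), words_per_line):
--         chunk = words[i : i + words_per_line]
--         lines.append(" ".join(chunk))
--
--     # Markdown hard line breaks
--     return "  \n".join(lines)
-- ===== SOURCE B (Python) =====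
-- WORDS_PER_LINE = 4  # how many words in each rendered line
--
--
-- def _format_words_md(words: list[str], words_per_line: int = WORDS_PER_LINE) -> str:
--     if words_per_line <= 0:
--         raise ValueError("words_per_line must be > 0")
--
--     # Single pass: emit each word preceded by its positional separator
--     # (markdown hard break every words_per_line words), no chunking.
--     parts: list[str] = []
--     for i, word in enumerate(words):
--         if i > 0:
--             parts.append("  \n" if i % words_per_line == 0 else " ")
--         parts.append(word)
--     return "".join(parts)
-- ===== Notes on version B (the rewrite author's own statement) =====
-- stated objective: alternative
-- what changed: Replaces the chunk-then-join-twice scheme (slice into words_per_line groups, space-join each group, newline-join the groups) by a single enumerate pass that emits each word preceded by its positional separator (markdown break when i % words_per_line == 0, else a space) and one final ''.join.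
import Mathlib
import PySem

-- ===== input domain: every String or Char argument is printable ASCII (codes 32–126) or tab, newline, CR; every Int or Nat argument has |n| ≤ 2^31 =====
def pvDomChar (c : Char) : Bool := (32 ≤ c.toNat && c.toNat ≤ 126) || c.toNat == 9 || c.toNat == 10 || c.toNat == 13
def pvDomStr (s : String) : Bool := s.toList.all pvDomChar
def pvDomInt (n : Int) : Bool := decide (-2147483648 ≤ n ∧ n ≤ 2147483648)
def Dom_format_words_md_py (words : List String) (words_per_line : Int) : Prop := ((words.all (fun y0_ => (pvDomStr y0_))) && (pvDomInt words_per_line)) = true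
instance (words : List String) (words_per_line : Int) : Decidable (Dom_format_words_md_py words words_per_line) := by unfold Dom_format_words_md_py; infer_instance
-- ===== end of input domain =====

-- B replaces A's chunk-and-double-join by a single enumerate pass emitting each
-- word with its positional separator; same O(n) cost, different decomposition.

-- ===== PORT A =====
-- A raises ValueError for words_per_line ≤ 0; those inputs are excluded by Pre_ (the `else ""` is dead under Pre_).
def format_words_md_py (words : List String) (words_per_line : Int) : String :=
  if words_per_line ≤ 0 then "" else
  let lines : List String :=
    (PySem.List.pyRange 0 (PySem.List.len words) words_per_line).foldl
      (fun acc i =>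
        let chunk := PySem.List.slice words (some i) (some (i + words_per_line))
        acc ++ [PySem.Str.join " " chunk]) []
  PySem.Str.join "  \n" lines

-- ===== PORT B =====
def format_words_md_py_alt (words : List String) (words_per_line : Int) : String :=
  if words_per_line ≤ 0 then "" else
  let parts : List String :=
    (PySem.List.enumerate words 0).foldl
      (fun acc p =>
        (if p.1 > 0 then
            acc ++ [if PySem.Int.mod p.1 words_per_line = 0 then "  \n" else " "]
          else acc) ++ [p.2]) []
  PySem.Str.join "" parts

-- ===== PRECONDITION & SPEC =====
-- Pre_ excludes exactly words_per_line ≤ 0, where the Python A raises ValueError.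
def Pre_format_words_md_py (words : List String) (words_per_line : Int) : Prop :=
  0 < words_per_line
instance (words : List String) (words_per_line : Int) : Decidable (Pre_format_words_md_py words words_per_line) := by unfold Pre_format_words_md_py; infer_instance

def pvWitness_format_words_md_py : List String × Int := (["lorem", "ipsum", "dolor"], 2)

def Spec_format_words_md_py (words : List String) (words_per_line : Int) (out : String) : Prop := out = format_words_md_py_alt words words_per_line
instance (words : List String) (words_per_line : Int) (out : String) : Decidable (Spec_format_words_md_py words words_per_line out) := by unfold Spec_format_words_md_py; infer_instance

-- ===== CLAIM (what is proved, stated in full; the proofs are below) =====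
def Claim_equal_format_words_md_py : Prop := ∀ (words : List String) (words_per_line : Int), Dom_format_words_md_py words words_per_line → Pre_format_words_md_py words words_per_line → Spec_format_words_md_py words words_per_line (format_words_md_py words words_per_line)

-- ===== LEMMAS AND PROOFS =====

def fbChars (n : Int) : List String → Int → List Char
  | [], _ => []
  | w :: t, i =>
      (if PySem.Int.mod i n = 0 then [' ', ' ', '\n'] else [' ']) ++ w.toList ++ fbChars n t (i + 1)

def spTail (cr : List String) : List Char := cr.flatMap (fun u => ' ' :: u.toList)

theorem joinNil_eq_flatten (ps : List String) :
    (PySem.Str.join "" ps).toList = (ps.map String.toList).flatten := by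
  rw [PySem.Str.toList_join]
  induction ps with
  | nil => simp [PySem.Chars.join_nil]
  | cons p ps ih =>
    cases ps with
    | nil => simp [PySem.Chars.join_singleton]
    | cons q qs =>
      rw [List.map_cons, List.map_cons, PySem.Chars.join_cons_cons]
      rw [List.map_cons] at ih
      rw [List.flatten_cons, ih]
      have : ("" : String).toList = [] := rfl
      simp [this]

theorem join_space_chars (w : String) (cr : List String) :
    (PySem.Str.join " " (w :: cr)).toList = w.toList ++ spTail cr := by
  rw [PySem.Str.toList_join]
  induction cr generalizing w with
  | nil => simp [PySem.Chars.join_singleton, spTail]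
  | cons q qs ih =>
    rw [List.map_cons, List.map_cons, PySem.Chars.join_cons_cons]
    have h := ih q
    rw [List.map_cons] at h
    rw [h]
    have hsp : (" " : String).toList = [' '] := rfl
    simp [spTail, hsp]

theorem fbChars_shift (n : Int) (hn : 0 < n) (t : List String) :
    ∀ (i : Int), fbChars n t (i + n) = fbChars n t i := by
  induction t with
  | nil => intro i; rfl
  | cons w t ih =>
    intro i
    simp only [fbChars]
    rw [PySem.Int.mod_eq_emod_of_pos hn, PySem.Int.mod_eq_emod_of_pos hn]
    have h1 : (i + n) % n = i % n := by
      have h := Int.add_mul_emod_self_left (a := i) (b := n) (c := 1)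
      simpa using h
    rw [h1]
    have h2 : i + n + 1 = (i + 1) + n := by ring
    rw [h2, ih]

theorem fbChars_chunk (n : Int) (hn : 0 < n) (cr : List String) :
    ∀ (rest : List String) (i : Int), 0 < i → i + cr.length ≤ n →
      fbChars n (cr ++ rest) i = spTail cr ++ fbChars n rest (i + cr.length) := by
  induction cr with
  | nil => intro rest i _ _; simp [spTail]
  | cons c cr ih =>
    intro rest i hi hle
    simp only [List.cons_append, fbChars]
    have hin : i < n := by simp at hle; omega
    have hmod : PySem.Int.mod i n ≠ 0 := by
      rw [PySem.Int.mod_eq_emod_of_pos hn, Int.emod_eq_of_lt (by omega) hin]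
      omega
    rw [if_neg hmod, ih rest (i + 1) (by omega) (by simp at hle ⊢; omega)]
    have hidx : i + 1 + (cr.length : Int) = i + ((c :: cr).length : Int) := by
      simp [List.length_cons]; omega
    rw [hidx]
    simp [spTail]

theorem b_fold_chars (n : Int) (t : List String) :
    ∀ (s : Int) (acc : List String), 0 < s →
      (PySem.Str.join ""
        ((PySem.List.enumerate t s).foldl
          (fun acc p =>
            (if p.1 > 0 then acc ++ [if PySem.Int.mod p.1 n = 0 then "  \n" else " "] else acc) ++ [p.2]) acc)).toList
      = (PySem.Str.join "" acc).toList ++ fbChars n t s := by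
  induction t with
  | nil => intro s acc _; simp [PySem.List.enumerate, fbChars]
  | cons w t ih =>
    intro s acc hs
    rw [PySem.List.enumerate_cons, List.foldl_cons]
    rw [ih (s + 1) _ (by omega)]
    simp only [fbChars, if_pos hs]
    rw [joinNil_eq_flatten, joinNil_eq_flatten]
    by_cases hm : PySem.Int.mod s n = 0
    · rw [if_pos hm, if_pos hm]
      have : ("  \n" : String).toList = [' ', ' ', '\n'] := rfl
      simp [this]
    · rw [if_neg hm, if_neg hm]
      have : (" " : String).toList = [' '] := rfl
      simp [this]


theorem chunkLines (n : Int) (hn : 0 < n) (ws : List String) (hws : ws ≠ []) :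
    (PySem.List.pyRange 0 (PySem.List.len ws) n).map
        (fun i => PySem.Str.join " " (PySem.List.slice ws (some i) (some (i + n))))
      = PySem.Str.join " " (ws.take n.toNat) ::
        (PySem.List.pyRange 0 (PySem.List.len (ws.drop n.toNat)) n).map
          (fun i => PySem.Str.join " " (PySem.List.slice (ws.drop n.toNat) (some i) (some (i + n)))) := by
  obtain ⟨nN, rfl⟩ := Int.eq_ofNat_of_zero_le hn.le
  have hnN : 0 < nN := by exact_mod_cast hn
  simp only [PySem.List.len_eq, Int.toNat_natCast]
  rw [PySem.List.pyRange_of_pos _ _ hn, PySem.List.pyRange_of_pos _ _ hn]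
  have hL : 0 < ws.length := List.length_pos_of_ne_nil hws
  have hcount : (if (0:Int) < (ws.length:Int) then (((ws.length:Int) - 0 + nN - 1) / nN).toNat else 0)
      = (if (0:Int) < ((ws.drop nN).length:Int) then ((((ws.drop nN).length:Int) - 0 + nN - 1) / nN).toNat else 0) + 1 := by
    rw [if_pos (by exact_mod_cast hL), List.length_drop]
    by_cases hc : ws.length ≤ nN
    · rw [if_neg (by push_cast; omega)]
      have h1 : ((ws.length:Int) - 0 + nN - 1) / nN = 1 := by
        rw [← PySem.Int.floordiv_eq_ediv_of_pos hn,
            PySem.Int.floordiv_eq_iff_of_pos hn]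
        push_cast
        constructor <;> nlinarith [hL, hc, hnN]
      rw [h1]; rfl
    · rw [if_pos (by push_cast; omega)]
      have hkey : ((ws.length:Int) - 0 + nN - 1) / nN
          = ((ws.length:Int) - nN - 0 + nN - 1) / nN + 1 := by
        have h := Int.add_mul_ediv_right ((ws.length:Int) - nN - 0 + nN - 1) 1 (by omega : (nN:Int) ≠ 0)
        have he : ((ws.length:Int) - nN - 0 + nN - 1) + 1 * nN = (ws.length:Int) - 0 + nN - 1 := by ring
        rw [he] at h
        omega
      have hcast : ((ws.length - nN : Nat) : Int) = (ws.length:Int) - nN := by push_cast; omega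
      rw [hcast, hkey]
      have hpos : (0:Int) ≤ ((ws.length:Int) - nN - 0 + nN - 1) / nN :=
        Int.ediv_nonneg (by push_cast; omega) (by omega)
      omega
  rw [hcount, List.range_succ_eq_map, List.map_cons, List.map_map, List.map_map]
  have e0 : (0:Int) + (nN:Int) * ((0:Nat):Int) = 0 := by push_cast; ring
  rw [e0, List.map_cons]
  congr 1
  · -- head chunk
    rw [PySem.List.slice_zero_start]
    have e1 : (0:Int) + (nN:Int) = ((nN:Nat):Int) := by push_cast; ring
    rw [e1, PySem.List.slice_to_natCast]
  · -- tail chunks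
    rw [List.map_map]
    apply List.map_congr_left
    intro k _
    simp only [Function.comp_apply]
    have e1 : (0:Int) + (nN:Int) * ((Nat.succ k : Nat) : Int) = ((nN * (k+1) : Nat) : Int) := by
      push_cast; ring
    have e2 : (0:Int) + (nN:Int) * ((k:Nat) : Int) = ((nN * k : Nat) : Int) := by
      push_cast; ring
    rw [e1, e2, PySem.List.slice_natCast_add, PySem.List.slice_natCast_add]
    rw [List.drop_drop]
    rw [show nN * (k + 1) = nN + nN * k by ring]

theorem main_bridge (n : Int) (hn : 0 < n) :
    ∀ (L : Nat) (w : String) (t : List String), (w :: t).length ≤ L →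
      (PySem.Str.join "  \n"
        ((PySem.List.pyRange 0 (PySem.List.len (w :: t)) n).map
          (fun i => PySem.Str.join " " (PySem.List.slice (w :: t) (some i) (some (i + n)))))).toList
      = w.toList ++ fbChars n t 1 := by
  intro L
  induction L with
  | zero => intro w t h; simp at h
  | succ L ihL =>
    intro w t hlen
    obtain ⟨nN, rfl⟩ := Int.eq_ofNat_of_zero_le hn.le
    have hnN : 0 < nN := by exact_mod_cast hn
    rw [chunkLines _ hn _ (by simp)]
    have htake : (w :: t).take ((nN:Int)).toNat = w :: t.take (nN - 1) := by
      rw [Int.toNat_natCast, show nN = (nN - 1) + 1 by omega, List.take_succ_cons]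
      simp
    have hdrop : (w :: t).drop ((nN:Int)).toNat = t.drop (nN - 1) := by
      rw [Int.toNat_natCast, show nN = (nN - 1) + 1 by omega, List.drop_succ_cons]
      simp
    rw [htake, hdrop]
    rcases hrest : t.drop (nN - 1) with _ | ⟨r, rt⟩
    · -- last line
      have hcr : t.take (nN - 1) = t := by
        have := List.drop_eq_nil_iff.mp hrest
        exact List.take_of_length_le this
      have hlines : (PySem.List.pyRange 0 (PySem.List.len ([] : List String)) (nN:Int)) = [] := by
        rw [PySem.List.pyRange_of_pos _ _ hn]
        simp
      rw [hlines, List.map_nil, PySem.Str.toList_join, List.map_cons, List.map_nil,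
          PySem.Chars.join_singleton, join_space_chars]
      have hchunk := fbChars_chunk (nN:Int) hn t [] 1 (by omega)
        (by
          have hlt : t.length ≤ nN - 1 := List.drop_eq_nil_iff.mp hrest
          push_cast
          omega)
      simp only [List.append_nil, fbChars] at hchunk
      rw [hcr, hchunk]
    · -- at least one more line
      have hlt : nN - 1 < t.length := by
        by_contra hc
        rw [List.drop_eq_nil_iff.mpr (by omega)] at hrest
        simp at hrest
      have hcr : (t.take (nN - 1)).length = nN - 1 := by simp; omega
      -- split the join of the cons-cons line list
      rw [chunkLines _ hn _ (by simp)]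
      rw [PySem.Str.toList_join, List.map_cons, List.map_cons, PySem.Chars.join_cons_cons,
          ← List.map_cons, ← PySem.Str.toList_join]
      rw [← chunkLines _ hn (r :: rt) (by simp)]
      have hrlen : (r :: rt).length ≤ L := by
        have h1 : (r :: rt).length = t.length - (nN - 1) := by
          rw [← hrest, List.length_drop]
        simp at hlen
        simp [h1]
        omega
      rw [ihL r rt hrlen]
      rw [join_space_chars]
      -- right-hand side
      have hsplit : t = t.take (nN - 1) ++ (r :: rt) := by rw [← hrest]; simp
      conv_rhs => rw [hsplit]
      rw [fbChars_chunk (nN:Int) hn _ (r :: rt) 1 (by omega) (by rw [hcr]; push_cast; omega)]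
      rw [hcr, show (1 : Int) + ((nN - 1 : Nat) : Int) = (nN : Int) by push_cast; omega]
      show _ = _ ++ (spTail _ ++ fbChars _ (r :: rt) _)
      rw [show fbChars ((nN:Nat):Int) (r :: rt) (nN:Int)
            = (if PySem.Int.mod (nN:Int) (nN:Int) = 0 then [' ', ' ', '\n'] else [' '])
              ++ r.toList ++ fbChars (nN:Int) rt ((nN:Int) + 1) from rfl]
      rw [if_pos (by rw [PySem.Int.mod_eq_emod_of_pos hn]; exact Int.emod_self)]
      rw [show ((nN:Int) + 1) = 1 + (nN:Int) by ring, fbChars_shift _ hn]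
      have hnl : ("  \n" : String).toList = [' ', ' ', '\n'] := rfl
      rw [hnl]
      simp

theorem ports_agree_of_pos (words : List String) (n : Int) (hn : 0 < n) :
    format_words_md_py words n = format_words_md_py_alt words n := by
  unfold format_words_md_py format_words_md_py_alt
  rw [if_neg (by omega), if_neg (by omega)]
  apply String.toList_inj.mp
  rw [PySem.List.foldl_append_singleton_eq_map]
  cases words with
  | nil =>
    rw [PySem.List.len_eq]
    rw [PySem.List.pyRange_of_pos _ _ hn]
    simp [PySem.List.enumerate]
  | cons w t =>
    rw [List.nil_append, main_bridge n hn (w :: t).length w t le_rfl]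
    rw [PySem.List.enumerate_cons, List.foldl_cons]
    simp only [List.nil_append, zero_add, if_neg (by omega : ¬ ((0:Int) > 0))]
    rw [b_fold_chars n t 1 [w] (by omega)]
    rw [joinNil_eq_flatten]
    simp

-- ===== VERDICT (by name: the statement is the Claim_ definition above) =====
theorem format_words_md_py_spec : Claim_equal_format_words_md_py := by
  intro words words_per_line _hdom hpre
  unfold Spec_format_words_md_py
  exact ports_agree_of_pos words words_per_line hpre
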